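-- pv_equiv track=rewrite | github.com/chridey/altlex | misc/extractWikipediaAltlex.py | getMetaLabel
-- ===== SOURCE A (Python) =====
-- def getMetaLabel(labels):
--     if len(labels) == 0 or all(k[0] == 2 for k in labels):
--         return 'other'
--     elif all(k[0] in (1,2) for k in labels):
--         return 'causal'
--     elif all(k[0] in (0,2) for k in labels):
--         return 'notcausal'
--     elif all(k[0] in (3,2) for k in labels):
--         return 'reason'
--     elif all(k[0] in (4,2) for k in labels):
--         return 'result'
--     #elif not(any(k[0] for k in labels)):
--     #    return 'notcausal'
--     #elif all(k[0] for k in labels):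
--     #    return 'causal'
--     return 'both'
-- ===== SOURCE B (Python) =====
-- def getMetaLabel(labels):
--     has0 = has1 = has3 = has4 = has_other = False
--     for k in labels:
--         v = k[0]
--         if v == 0:
--             has0 = True
--         elif v == 1:
--             has1 = True
--         elif v == 3:
--             has3 = True
--         elif v == 4:
--             has4 = True
--         elif v != 2:
--             has_other = True
--     if not (has0 or has1 or has3 or has4 or has_other):
--         return 'other'
--     if has_other:
--         return 'both'
--     if has1 and not (has0 or has3 or has4):
--         return 'causal'
--     if has0 and not (has1 or has3 or has4):
--         return 'notcausal'
--     if has3 and not (has0 or has1 or has4):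
--         return 'reason'
--     if has4 and not (has0 or has1 or has3):
--         return 'result'
--     return 'both'
-- ===== Notes on version B (the rewrite author's own statement) =====
-- stated objective: simpler
-- what changed: Replaces the five repeated all()-scans over labels with a single pass that records which first-components occur (flags for 0,1,3,4 and out-of-range), then one dispatch on the flags with the same precedence.
-- outside the precondition, e.g. on getMetaLabel([(7,), ()]): A returns 'both', B raises IndexError
import Mathlib
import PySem

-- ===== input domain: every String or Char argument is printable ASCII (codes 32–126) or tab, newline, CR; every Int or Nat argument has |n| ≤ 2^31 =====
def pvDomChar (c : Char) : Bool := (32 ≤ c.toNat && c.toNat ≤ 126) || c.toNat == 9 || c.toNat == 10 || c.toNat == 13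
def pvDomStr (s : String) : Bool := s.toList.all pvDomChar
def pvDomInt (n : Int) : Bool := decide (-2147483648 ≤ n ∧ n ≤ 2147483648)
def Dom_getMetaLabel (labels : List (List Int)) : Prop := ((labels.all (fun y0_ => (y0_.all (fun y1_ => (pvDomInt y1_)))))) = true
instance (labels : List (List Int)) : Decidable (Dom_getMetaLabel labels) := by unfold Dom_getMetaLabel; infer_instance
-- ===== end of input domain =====

-- B replaces A's five repeated all()-scans by one flag-collecting pass and a single dispatch (objective: simpler).

-- ===== PORT A =====
-- k[0] is ported as k.headD 0: exact for nonempty k, which Pre_ guarantees (Python raises IndexError on empty k).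
def getMetaLabel (labels : List (List Int)) : String :=
  if labels.length == 0 || labels.all (fun k => k.headD 0 == 2) then "other"
  else if labels.all (fun k => k.headD 0 == 1 || k.headD 0 == 2) then "causal"
  else if labels.all (fun k => k.headD 0 == 0 || k.headD 0 == 2) then "notcausal"
  else if labels.all (fun k => k.headD 0 == 3 || k.headD 0 == 2) then "reason"
  else if labels.all (fun k => k.headD 0 == 4 || k.headD 0 == 2) then "result"
  else "both"

-- ===== PORT B =====
-- state: (has0, has1, has3, has4, has_other)
def altStep (acc : Bool × Bool × Bool × Bool × Bool) (k : List Int) : Bool × Bool × Bool × Bool × Bool :=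
  let v := k.headD 0
  let (h0, h1, h3, h4, ho) := acc
  if v == 0 then (true, h1, h3, h4, ho)
  else if v == 1 then (h0, true, h3, h4, ho)
  else if v == 3 then (h0, h1, true, h4, ho)
  else if v == 4 then (h0, h1, h3, true, ho)
  else if v != 2 then (h0, h1, h3, h4, true)
  else (h0, h1, h3, h4, ho)

def getMetaLabel_alt (labels : List (List Int)) : String :=
  let (h0, h1, h3, h4, ho) := labels.foldl altStep (false, false, false, false, false)
  if !(h0 || h1 || h3 || h4 || ho) then "other"
  else if ho then "both"
  else if h1 && !(h0 || h3 || h4) then "causal"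
  else if h0 && !(h1 || h3 || h4) then "notcausal"
  else if h3 && !(h0 || h1 || h4) then "reason"
  else if h4 && !(h0 || h1 || h3) then "result"
  else "both"

-- ===== PRECONDITION & SPEC =====
-- Pre_ excludes inputs containing an empty inner list: B's single pass reads every k[0] and raises IndexError there, while A either raises too or, when every short-circuiting all()-scan fails before reaching the empty list, happens to return 'both'.
def Pre_getMetaLabel (labels : List (List Int)) : Prop := ∀ k ∈ labels, k ≠ []
instance (labels : List (List Int)) : Decidable (Pre_getMetaLabel labels) := by unfold Pre_getMetaLabel; infer_instance
def pvWitness_getMetaLabel : List (List Int) := [[1], [2]]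
def Spec_getMetaLabel (labels : List (List Int)) (out : String) : Prop := out = getMetaLabel_alt labels
instance (labels : List (List Int)) (out : String) : Decidable (Spec_getMetaLabel labels out) := by unfold Spec_getMetaLabel; infer_instance

-- ===== CLAIM (what is proved, stated in full; the proofs are below) =====
def Claim_equal_getMetaLabel : Prop := ∀ (labels : List (List Int)), Dom_getMetaLabel labels → Pre_getMetaLabel labels → Spec_getMetaLabel labels (getMetaLabel labels)

-- ===== LEMMAS AND PROOFS =====

-- the per-element predicates the fold accumulates
def p0 (k : List Int) : Bool := k.headD 0 == 0
def p1 (k : List Int) : Bool := k.headD 0 == 1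
def p3 (k : List Int) : Bool := k.headD 0 == 3
def p4 (k : List Int) : Bool := k.headD 0 == 4
def po (k : List Int) : Bool := !(k.headD 0 == 0 || k.headD 0 == 1 || k.headD 0 == 2 || k.headD 0 == 3 || k.headD 0 == 4)

lemma flags_eq (l : List (List Int)) : ∀ acc : Bool × Bool × Bool × Bool × Bool,
    l.foldl altStep acc =
      (acc.1 || l.any p0, acc.2.1 || l.any p1, acc.2.2.1 || l.any p3,
       acc.2.2.2.1 || l.any p4, acc.2.2.2.2 || l.any po) := by
  induction l with
  | nil => intro acc; simp
  | cons k t ih =>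
    rintro ⟨a, b, c, d, e⟩
    simp only [List.foldl_cons, ih, List.any_cons]
    cases e0 : (k.headD 0 == 0) <;> cases e1 : (k.headD 0 == 1) <;>
      cases e2 : (k.headD 0 == 2) <;> cases e3 : (k.headD 0 == 3) <;>
      cases e4 : (k.headD 0 == 4) <;>
    first
      | (exfalso; simp only [beq_iff_eq, beq_eq_false_iff_ne] at e0 e1 e2 e3 e4; omega)
      | simp_all [altStep, p0, p1, p3, p4, po, beq_eq_decide, Bool.or_assoc, Bool.or_comm, Bool.or_left_comm]

lemma not_mem2 (k : List Int) : (!(k.headD 0 == 2)) = (p0 k || p1 k || p3 k || p4 k || po k) := by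
  cases e0 : (k.headD 0 == 0) <;> cases e1 : (k.headD 0 == 1) <;>
    cases e2 : (k.headD 0 == 2) <;> cases e3 : (k.headD 0 == 3) <;>
    cases e4 : (k.headD 0 == 4) <;>
  first
    | (exfalso; simp only [beq_iff_eq, beq_eq_false_iff_ne] at e0 e1 e2 e3 e4; omega)
    | simp_all [p0, p1, p3, p4, po]

lemma not_mem12 (k : List Int) : (!(k.headD 0 == 1 || k.headD 0 == 2)) = (p0 k || p3 k || p4 k || po k) := by
  cases e0 : (k.headD 0 == 0) <;> cases e1 : (k.headD 0 == 1) <;>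
    cases e2 : (k.headD 0 == 2) <;> cases e3 : (k.headD 0 == 3) <;>
    cases e4 : (k.headD 0 == 4) <;>
  first
    | (exfalso; simp only [beq_iff_eq, beq_eq_false_iff_ne] at e0 e1 e2 e3 e4; omega)
    | simp_all [p0, p1, p3, p4, po]

lemma not_mem02 (k : List Int) : (!(k.headD 0 == 0 || k.headD 0 == 2)) = (p1 k || p3 k || p4 k || po k) := by
  cases e0 : (k.headD 0 == 0) <;> cases e1 : (k.headD 0 == 1) <;>
    cases e2 : (k.headD 0 == 2) <;> cases e3 : (k.headD 0 == 3) <;>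
    cases e4 : (k.headD 0 == 4) <;>
  first
    | (exfalso; simp only [beq_iff_eq, beq_eq_false_iff_ne] at e0 e1 e2 e3 e4; omega)
    | simp_all [p0, p1, p3, p4, po]

lemma not_mem32 (k : List Int) : (!(k.headD 0 == 3 || k.headD 0 == 2)) = (p0 k || p1 k || p4 k || po k) := by
  cases e0 : (k.headD 0 == 0) <;> cases e1 : (k.headD 0 == 1) <;>
    cases e2 : (k.headD 0 == 2) <;> cases e3 : (k.headD 0 == 3) <;>
    cases e4 : (k.headD 0 == 4) <;>
  first
    | (exfalso; simp only [beq_iff_eq, beq_eq_false_iff_ne] at e0 e1 e2 e3 e4; omega)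
    | simp_all [p0, p1, p3, p4, po]

lemma not_mem42 (k : List Int) : (!(k.headD 0 == 4 || k.headD 0 == 2)) = (p0 k || p1 k || p3 k || po k) := by
  cases e0 : (k.headD 0 == 0) <;> cases e1 : (k.headD 0 == 1) <;>
    cases e2 : (k.headD 0 == 2) <;> cases e3 : (k.headD 0 == 3) <;>
    cases e4 : (k.headD 0 == 4) <;>
  first
    | (exfalso; simp only [beq_iff_eq, beq_eq_false_iff_ne] at e0 e1 e2 e3 e4; omega)
    | simp_all [p0, p1, p3, p4, po]

lemma any_or2 (l : List (List Int)) (p q : List Int → Bool) :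
    (l.any fun x => p x || q x) = (l.any p || l.any q) := by
  induction l with
  | nil => rfl
  | cons a t ih => simp [List.any_cons, ih, Bool.or_assoc, Bool.or_left_comm]

-- ===== VERDICT (by name: the statement is the Claim_ definition above) =====
theorem getMetaLabel_spec : Claim_equal_getMetaLabel := by
  intro labels _ _
  unfold Spec_getMetaLabel getMetaLabel getMetaLabel_alt
  rw [flags_eq]
  have h2 : labels.all (fun k => k.headD 0 == 2)
      = !(labels.any p0 || labels.any p1 || labels.any p3 || labels.any p4 || labels.any po) := by
    rw [List.all_eq_not_any_not, funext not_mem2]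
    simp only [any_or2]
  have h12 : labels.all (fun k => k.headD 0 == 1 || k.headD 0 == 2)
      = !(labels.any p0 || labels.any p3 || labels.any p4 || labels.any po) := by
    rw [List.all_eq_not_any_not, funext not_mem12]
    simp only [any_or2]
  have h02 : labels.all (fun k => k.headD 0 == 0 || k.headD 0 == 2)
      = !(labels.any p1 || labels.any p3 || labels.any p4 || labels.any po) := by
    rw [List.all_eq_not_any_not, funext not_mem02]
    simp only [any_or2]
  have h32 : labels.all (fun k => k.headD 0 == 3 || k.headD 0 == 2)
      = !(labels.any p0 || labels.any p1 || labels.any p4 || labels.any po) := by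
    rw [List.all_eq_not_any_not, funext not_mem32]
    simp only [any_or2]
  have h42 : labels.all (fun k => k.headD 0 == 4 || k.headD 0 == 2)
      = !(labels.any p0 || labels.any p1 || labels.any p3 || labels.any po) := by
    rw [List.all_eq_not_any_not, funext not_mem42]
    simp only [any_or2]
  rw [h2, h12, h02, h32, h42]
  cases labels with
  | nil => decide
  | cons k t =>
    cases hA : (k :: t).any p0 <;> cases hB : (k :: t).any p1 <;>
      cases hC : (k :: t).any p3 <;> cases hD : (k :: t).any p4 <;>
      cases hE : (k :: t).any po <;> simp
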